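-- pv_equiv track=rewrite | github.com/finlaymcnally/RecipeImporter | cookimport/labelstudio/prelabel_prompt.py | _collapse_block_index_ranges
-- ===== SOURCE A (Python) =====
-- def _collapse_block_index_ranges(indices: list[int]) -> str:
--     if not indices:
--         return ""
--     ordered = sorted(set(indices))
--     ranges: list[str] = []
--     start = ordered[0]
--     end = ordered[0]
--     for value in ordered[1:]:
--         if value == end + 1:
--             end = value
--             continue
--         if start == end:
--             ranges.append(str(start))
--         else:
--             ranges.append(f"{start}-{end}")
--         start = value
--         end = value
--     if start == end:
--         ranges.append(str(start))
--     else: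
--         ranges.append(f"{start}-{end}")
--     return ", ".join(ranges)
-- ===== SOURCE B (Python) =====
-- def _collapse_block_index_ranges(indices: list[int]) -> str:
--     s = set(indices)
--     parts: list[str] = []
--     for start in sorted(v for v in s if v - 1 not in s):
--         end = start
--         while end + 1 in s:
--             end += 1
--         parts.append(str(start) if start == end else f"{start}-{end}")
--     return ", ".join(parts)
-- ===== Notes on version B (the rewrite author's own statement) =====
-- stated objective: alternative
-- what changed: B never merges a sorted list: it detects each run start directly by the set-membership test 'v-1 not in s', then walks that run forward with 'end+1 in s' membership probes, instead of A's single left-to-right pass over sorted(set(indices)) threading start/end state with an explicit trailing flush.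
import Mathlib
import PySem

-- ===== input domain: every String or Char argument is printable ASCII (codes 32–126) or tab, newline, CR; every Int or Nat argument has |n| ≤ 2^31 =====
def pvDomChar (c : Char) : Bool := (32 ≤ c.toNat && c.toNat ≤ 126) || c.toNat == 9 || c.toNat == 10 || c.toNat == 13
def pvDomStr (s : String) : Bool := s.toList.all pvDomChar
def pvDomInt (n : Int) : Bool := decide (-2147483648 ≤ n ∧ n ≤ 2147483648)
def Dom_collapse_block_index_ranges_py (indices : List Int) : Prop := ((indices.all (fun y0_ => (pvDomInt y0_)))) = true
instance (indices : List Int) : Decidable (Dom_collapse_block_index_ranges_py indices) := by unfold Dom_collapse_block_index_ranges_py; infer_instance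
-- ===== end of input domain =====

-- B detects run starts by the membership test v-1 ∉ set and walks each run forward with membership probes,
-- instead of A's single merging pass over the sorted deduplicated list (alternative algorithm, same cost).


-- ===== PORT A =====
-- A's for-loop over ordered[1:] with state (ranges, start, end), then the trailing flush and join.
def loopA (ranges : List String) (start e : Int) : List Int → List String
  | [] => ranges ++ [if start = e then PySem.Int.toStr start
                     else PySem.Int.toStr start ++ "-" ++ PySem.Int.toStr e]
  | v :: vs =>
    if v = e + 1 then loopA ranges start v vs
    else loopA (ranges ++ [if start = e then PySem.Int.toStr start
                           else PySem.Int.toStr start ++ "-" ++ PySem.Int.toStr e]) v v vs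

def collapse_block_index_ranges_py (indices : List Int) : String :=
  if indices = [] then ""
  else
    let ordered := PySem.List.sorted (PySem.Set.ofList indices) (fun x => x) false
    match ordered with
    | [] => ""   -- unreachable: sorted(set(indices)) of a nonempty list is nonempty
    | x :: rest => PySem.Str.join ", " (loopA [] x x rest)

-- ===== PORT B =====
-- B's 'while end + 1 in s: end += 1'. Python's loop terminates because s is finite and each
-- successful probe reaches a strictly larger member of s; fuel = |s| is a totality guard only.
def walkEnd (fuel : Nat) (s : List Int) (e : Int) : Int :=
  match fuel with
  | 0 => e
  | f + 1 => if (e + 1) ∈ s then walkEnd f s (e + 1) else e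

def collapse_block_index_ranges_py_alt (indices : List Int) : String :=
  let s := PySem.Set.ofList indices
  let starts := PySem.List.sorted (s.filter (fun v => decide ((v - 1) ∉ s))) (fun x => x) false
  let parts := starts.map (fun st =>
    let e := walkEnd s.length s st
    if st = e then PySem.Int.toStr st
    else PySem.Int.toStr st ++ "-" ++ PySem.Int.toStr e)
  PySem.Str.join ", " parts

-- ===== PRECONDITION & SPEC =====
def Spec_collapse_block_index_ranges_py (indices : List Int) (out : String) : Prop := out = collapse_block_index_ranges_py_alt indices
instance (indices : List Int) (out : String) : Decidable (Spec_collapse_block_index_ranges_py indices out) := by unfold Spec_collapse_block_index_ranges_py; infer_instance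

-- ===== CLAIM (what is proved, stated in full; the proofs are below) =====
def Claim_equal_collapse_block_index_ranges_py : Prop := ∀ (indices : List Int), Dom_collapse_block_index_ranges_py indices → Spec_collapse_block_index_ranges_py indices (collapse_block_index_ranges_py indices)

-- ===== LEMMAS AND PROOFS =====

def renderRun (r : Int × Int) : String :=
  if r.1 = r.2 then PySem.Int.toStr r.1
  else PySem.Int.toStr r.1 ++ "-" ++ PySem.Int.toStr r.2

-- addRun v runs: prepend v to the run decomposition, fusing with the first run when adjacent.
def addRun (v : Int) (runs : List (Int × Int)) : List (Int × Int) :=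
  match runs with
  | (a, b) :: rest => if v + 1 = a then (v, b) :: rest else (v, v) :: (a, b) :: rest
  | [] => [(v, v)]

def runsOf (l : List Int) : List (Int × Int) := l.foldr addRun []

-- mergeRun (s,e) runs: prepend the open run [s..e], fusing with the leading run when adjacent.
def mergeRun (s e : Int) (runs : List (Int × Int)) : List (Int × Int) :=
  match runs with
  | (a, b) :: rest => if e + 1 = a then (s, b) :: rest else (s, e) :: (a, b) :: rest
  | [] => [(s, e)]

theorem addRun_eq_mergeRun (v : Int) (runs : List (Int × Int)) :
    addRun v runs = mergeRun v v runs := by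
  cases runs with
  | nil => rfl
  | cons h t => cases h; rfl

theorem mergeRun_mergeRun (s e v : Int) (runs : List (Int × Int)) :
    mergeRun s e (mergeRun v v runs) =
      if v = e + 1 then mergeRun s v runs else (s, e) :: mergeRun v v runs := by
  cases runs with
  | nil =>
    by_cases h2 : v = e + 1
    · subst h2; simp [mergeRun]
    · have hev : ¬ (e + 1 = v) := fun h => h2 h.symm
      simp [mergeRun, h2, hev]
  | cons hd t =>
    cases hd with
    | mk a b =>
      by_cases h2 : v = e + 1 <;> by_cases h1 : v + 1 = a
      · subst h2; simp [mergeRun, h1]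
      · subst h2; simp [mergeRun, h1]
      · have hev : ¬ (e + 1 = v) := fun h => h2 h.symm
        simp [mergeRun, h1, h2, hev]
      · have hev : ¬ (e + 1 = v) := fun h => h2 h.symm
        simp [mergeRun, h1, h2, hev]

theorem loopA_eq (l : List Int) :
    ∀ (ranges : List String) (s e : Int),
      loopA ranges s e l = ranges ++ (mergeRun s e (runsOf l)).map renderRun := by
  induction l with
  | nil =>
    intro ranges s e
    simp [loopA, runsOf, mergeRun, renderRun]
  | cons v vs ih =>
    intro ranges s e
    simp only [runsOf, List.foldr_cons, addRun_eq_mergeRun v, loopA]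
    rw [mergeRun_mergeRun]
    by_cases h : v = e + 1
    · simp [h, ih, runsOf]
    · simp [h, ih, runsOf, renderRun, List.append_assoc]

-- ---- B-side: walkEnd basics ----

theorem walkEnd_succ (f : Nat) (s : List Int) (e : Int) :
    walkEnd (f + 1) s e = if (e + 1) ∈ s then walkEnd f s (e + 1) else e := rfl

theorem walkEnd_not_mem (f : Nat) (s : List Int) (e : Int) (h : (e + 1) ∉ s) :
    walkEnd f s e = e := by
  cases f with
  | zero => rfl
  | succ f => simp [walkEnd, h]

theorem length_filter_mono (s : List Int) (p q : Int → Bool)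
    (h : ∀ x, p x = true → q x = true) :
    (s.filter p).length ≤ (s.filter q).length := by
  induction s with
  | nil => simp
  | cons a t ih =>
    by_cases hp : p a = true
    · simp [hp, h a hp]; omega
    · by_cases hq : q a = true <;>
        simp [hp, hq] <;> omega

theorem count_succ_lt (s : List Int) (e : Int) (h : (e + 1) ∈ s) :
    (s.filter (fun x => decide (e + 1 < x))).length
      < (s.filter (fun x => decide (e < x))).length := by
  induction s with
  | nil => simp at h
  | cons a t ih =>
    by_cases ha : a = e + 1
    · subst ha
      have hA : (((e+1) :: t).filter (fun x => decide (e + 1 < x))).length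
          = (t.filter (fun x => decide (e + 1 < x))).length := by simp
      have hB : (((e+1) :: t).filter (fun x => decide (e < x))).length
          = (t.filter (fun x => decide (e < x))).length + 1 := by simp
      have := length_filter_mono t (fun x => decide (e + 1 < x)) (fun x => decide (e < x))
        (by intro x hx; simp at hx ⊢; omega)
      omega
    · have ht : (e + 1) ∈ t := by
        cases h with
        | head => exact absurd rfl ha
        | tail _ h => exact h
      have ih' := ih ht
      by_cases h1 : e + 1 < a
      · have h2 : e < a := by omega
        simp only [List.filter_cons, decide_eq_true h1, decide_eq_true h2, if_true, List.length_cons]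
        omega
      · by_cases h2 : e < a
        · simp only [List.filter_cons, decide_eq_false h1, decide_eq_true h2, if_true, List.length_cons]
          omega
        · simp only [List.filter_cons, decide_eq_false h1, decide_eq_false h2]
          exact ih'

theorem walkEnd_fuel (f : Nat) :
    ∀ (g : Nat) (s : List Int) (e : Int),
      (s.filter (fun x => decide (e < x))).length ≤ f →
      (s.filter (fun x => decide (e < x))).length ≤ g →
      walkEnd f s e = walkEnd g s e := by
  induction f with
  | zero =>
    intro g s e hf _
    have hnm : (e + 1) ∉ s := by
      intro hm
      have : 0 < (s.filter (fun x => decide (e < x))).length := by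
        have : (e + 1) ∈ s.filter (fun x => decide (e < x)) := by
          simp [List.mem_filter, hm]
        exact List.length_pos_of_mem this
      omega
    rw [walkEnd_not_mem _ _ _ hnm, walkEnd_not_mem _ _ _ hnm]
  | succ f ih =>
    intro g s e hf hg
    by_cases hm : (e + 1) ∈ s
    · have hlt := count_succ_lt s e hm
      cases g with
      | zero =>
        exfalso
        have : 0 < (s.filter (fun x => decide (e < x))).length := by omega
        omega
      | succ g =>
        simp only [walkEnd, hm, if_true]
        exact ih g s (e + 1) (by omega) (by omega)
    · rw [walkEnd_not_mem _ _ _ hm, walkEnd_not_mem _ _ _ hm]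

theorem walkEnd_congr (s t : List Int) (hmem : ∀ x, x ∈ s ↔ x ∈ t) :
    ∀ (f : Nat) (e : Int), walkEnd f s e = walkEnd f t e := by
  intro f
  induction f with
  | zero => intro e; rfl
  | succ f ih =>
    intro e
    by_cases hm : (e + 1) ∈ s
    · have hm' : (e + 1) ∈ t := (hmem _).mp hm
      simp [walkEnd, hm, hm', ih]
    · have hm' : (e + 1) ∉ t := fun h => hm ((hmem _).mpr h)
      simp [walkEnd, hm, hm']

theorem walkEnd_drop_head (v : Int) (vs : List Int) :
    ∀ (f : Nat) (e : Int), v ≤ e → walkEnd f (v :: vs) e = walkEnd f vs e := by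
  intro f
  induction f with
  | zero => intro e _; rfl
  | succ f ih =>
    intro e hve
    have hne : e + 1 ≠ v := by omega
    by_cases hm : (e + 1) ∈ vs
    · simp [walkEnd, hm, hne, ih (e + 1) (by omega)]
    · simp [walkEnd, hm, hne]

-- first run of runsOf starts at the head of the list
theorem addRun_head (w : Int) (r : List (Int × Int)) :
    ∃ b rest, addRun w r = (w, b) :: rest := by
  cases r with
  | nil => exact ⟨w, [], rfl⟩
  | cons h t =>
    cases h with
    | mk a b =>
      by_cases hf : w + 1 = a
      · exact ⟨b, t, by simp [addRun, hf]⟩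
      · exact ⟨w, (a, b) :: t, by simp [addRun, hf]⟩

-- THE CORE: on a strictly increasing list, B's (start, walked-end) pairs are exactly the run decomposition.
theorem runsB_eq (l : List Int) (hsort : l.Pairwise (· < ·)) :
    (l.filter (fun v => decide ((v - 1) ∉ l))).map
        (fun st => (st, walkEnd l.length l st)) = runsOf l := by
  induction l with
  | nil => rfl
  | cons v vs ih =>
    have hv : ∀ w ∈ vs, v < w := by
      intro w hw; exact (List.pairwise_cons.mp hsort).1 w hw
    have hvs : vs.Pairwise (· < ·) := (List.pairwise_cons.mp hsort).2
    have hv1 : (v - 1) ∉ (v :: vs) := by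
      intro h
      rcases List.mem_cons.mp h with h | h
      · omega
      · have := hv _ h; omega
    have hwalk_tail : ∀ st ∈ vs, walkEnd (v :: vs).length (v :: vs) st = walkEnd vs.length vs st := by
      intro st hst
      have hvst : v ≤ st := le_of_lt (hv st hst)
      rw [walkEnd_drop_head v vs _ st hvst]
      exact walkEnd_fuel _ _ _ _
        (le_trans (List.length_filter_le _ _) (by simp))
        (List.length_filter_le _ _)
    by_cases hmem : (v + 1) ∈ vs
    · -- vs starts with v+1: the run of v extends into vs
      cases vs with
      | nil => simp at hmem
      | cons a vs' =>
        have ha : a = v + 1 := by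
          rcases List.mem_cons.mp hmem with h | h
          · omega
          · have h1 := hv _ (List.mem_cons_self)
            have h2 := (List.pairwise_cons.mp hvs).1 _ h
            omega
        subst ha
        -- filters
        have hfilter_l : ((v :: (v+1) :: vs').filter (fun w => decide ((w - 1) ∉ (v :: (v+1) :: vs'))))
            = v :: (vs'.filter (fun w => decide ((w - 1) ∉ ((v+1) :: vs')))) := by
          have hhead : (decide ((v - 1) ∉ (v :: (v+1) :: vs'))) = true := by
            simp only [decide_eq_true_eq]; exact hv1
          have ha' : (decide (((v+1) - 1) ∉ (v :: (v+1) :: vs'))) = false := by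
            simp only [decide_eq_false_iff_not, not_not]
            have : (v + 1 : Int) - 1 = v := by omega
            rw [this]; exact List.mem_cons_self
          simp only [List.filter_cons, hhead, ha', if_true]
          congr 1
          apply List.filter_congr
          intro w hw
          have hwgt : v + 1 < w := (List.pairwise_cons.mp hvs).1 w hw
          simp only [decide_eq_decide, List.mem_cons]
          constructor
          · intro h hc; exact h (Or.inr hc)
          · intro h hc
            rcases hc with hc | hc
            · omega
            · exact h hc
        have hfilter_vs : (((v+1) :: vs').filter (fun w => decide ((w - 1) ∉ ((v+1) :: vs'))))
            = (v+1) :: (vs'.filter (fun w => decide ((w - 1) ∉ ((v+1) :: vs')))) := by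
          have hhead : (decide (((v+1) - 1) ∉ ((v+1) :: vs'))) = true := by
            simp only [decide_eq_true_eq]
            intro h
            have hv' : (v + 1 : Int) - 1 = v := by omega
            rw [hv'] at h
            rcases List.mem_cons.mp h with h | h
            · omega
            · have := hv _ (List.mem_cons_of_mem _ h); omega
          simp only [List.filter_cons, hhead, if_true]
        have ihvs := ih hvs
        rw [hfilter_vs] at ihvs
        -- compute walkEnd for v on the full list
        have hwalkv : walkEnd (v :: (v+1) :: vs').length (v :: (v+1) :: vs') v
            = walkEnd ((v+1) :: vs').length ((v+1) :: vs') (v + 1) := by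
          have hm : (v + 1) ∈ (v :: (v+1) :: vs') := List.mem_cons_of_mem _ List.mem_cons_self
          have hlen : (v :: (v+1) :: vs').length = ((v+1) :: vs').length + 1 := by simp
          rw [hlen, walkEnd_succ, if_pos hm,
            walkEnd_drop_head v ((v+1) :: vs') _ (v + 1) (by omega)]
        -- assemble
        rw [hfilter_l]
        simp only [List.map_cons]
        rw [hwalkv]
        have hmapeq : (vs'.filter (fun w => decide ((w - 1) ∉ ((v+1) :: vs')))).map
              (fun st => (st, walkEnd (v :: (v+1) :: vs').length (v :: (v+1) :: vs') st))
            = (vs'.filter (fun w => decide ((w - 1) ∉ ((v+1) :: vs')))).map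
              (fun st => (st, walkEnd ((v+1) :: vs').length ((v+1) :: vs') st)) := by
          apply List.map_congr_left
          intro st hst
          have : st ∈ (v+1) :: vs' := List.mem_cons_of_mem _ (List.mem_of_mem_filter hst)
          rw [hwalk_tail st this]
        rw [hmapeq]
        -- RHS: runsOf (v :: (v+1) :: vs') fuses v with the first run
        obtain ⟨b, rest, heq⟩ := addRun_head (v + 1) (vs'.foldr addRun [])
        have hruns : runsOf ((v+1) :: vs') = (v + 1, b) :: rest := heq
        rw [hruns] at ihvs
        simp only [List.map_cons, List.cons.injEq, Prod.mk.injEq] at ihvs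
        obtain ⟨⟨_, hEb⟩, htail⟩ := ihvs
        rw [htail, hEb]
        show (v, b) :: rest = runsOf (v :: (v+1) :: vs')
        rw [show runsOf (v :: (v+1) :: vs')
              = addRun v (addRun (v + 1) (List.foldr addRun [] vs')) from rfl, heq]
        simp [addRun]
    · -- v+1 ∉ vs: v is a singleton run head w.r.t. fusing
      have hfilter_l : ((v :: vs).filter (fun w => decide ((w - 1) ∉ (v :: vs))))
          = v :: (vs.filter (fun w => decide ((w - 1) ∉ vs))) := by
        have hhead : (decide ((v - 1) ∉ (v :: vs))) = true := by
          simp only [decide_eq_true_eq]; exact hv1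
        simp only [List.filter_cons, hhead, if_true]
        congr 1
        apply List.filter_congr
        intro w hw
        have hwne : w ≠ v + 1 := fun h => hmem (h ▸ hw)
        simp only [decide_eq_decide, List.mem_cons]
        constructor
        · intro h hc; exact h (Or.inr hc)
        · intro h hc
          rcases hc with hc | hc
          · omega
          · exact h hc
      have hwalkv : walkEnd (v :: vs).length (v :: vs) v = v := by
        apply walkEnd_not_mem
        intro h
        rcases List.mem_cons.mp h with h | h
        · omega
        · exact hmem h
      rw [hfilter_l]
      simp only [List.map_cons, hwalkv]
      have hmapeq : (vs.filter (fun w => decide ((w - 1) ∉ vs))).map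
            (fun st => (st, walkEnd (v :: vs).length (v :: vs) st))
          = (vs.filter (fun w => decide ((w - 1) ∉ vs))).map
            (fun st => (st, walkEnd vs.length vs st)) := by
        apply List.map_congr_left
        intro st hst
        rw [hwalk_tail st (List.mem_of_mem_filter hst)]
      rw [hmapeq, ih hvs]
      show _ = runsOf (v :: vs)
      simp only [runsOf, List.foldr_cons]
      cases hcase : vs.foldr addRun [] with
      | nil => simp [addRun]
      | cons r rest =>
        cases r with
        | mk a b =>
          have hne : v + 1 ≠ a := by
            cases vs with
            | nil => simp at hcase
            | cons w t =>
              obtain ⟨b', rest', heq⟩ := addRun_head w (t.foldr addRun [])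
              have hc : (w, b') :: rest' = (a, b) :: rest := by
                rw [← heq, ← hcase]; rfl
              have hwa : w = a := congrArg Prod.fst (List.cons.inj hc).1
              intro hv1a
              exact hmem (by rw [hv1a, ← hwa]; exact List.mem_cons_self)
          simp only [addRun, if_neg hne]

-- sorting then filtering = filtering the set then sorting (identity key, strictly increasing output)
theorem sorted_filter_eq (S : List Int) (p : Int → Bool)
    (hs : (PySem.List.sorted S (fun x => x) false).Pairwise (· < ·)) :
    PySem.List.sorted (S.filter p) (fun x => x) false
      = (PySem.List.sorted S (fun x => x) false).filter p := by
  apply PySem.List.sorted_eq_of_perm_of_pairwise_lt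
  · exact (PySem.List.sorted_perm S (fun x => x) false).filter p
  · exact hs.filter p

-- B in terms of the run decomposition of the sorted set
theorem altB_eq (indices : List Int) :
    collapse_block_index_ranges_py_alt indices
      = PySem.Str.join ", "
          ((runsOf (PySem.List.sorted (PySem.Set.ofList indices) (fun x => x) false)).map renderRun) := by
  simp only [collapse_block_index_ranges_py_alt]
  have hpair : (fun (st : Int) =>
      let e := walkEnd (PySem.Set.ofList indices).length (PySem.Set.ofList indices) st
      if st = e then PySem.Int.toStr st
      else PySem.Int.toStr st ++ "-" ++ PySem.Int.toStr e)
      = (fun st => renderRun (st, walkEnd (PySem.Set.ofList indices).length (PySem.Set.ofList indices) st)) := by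
    funext st; rfl
  rw [hpair]
  congr 1
  rw [sorted_filter_eq _ _ (PySem.List.sorted_ofList_pairwise_lt indices)]
  have hmemiff : ∀ x : Int, x ∈ PySem.Set.ofList indices
      ↔ x ∈ PySem.List.sorted (PySem.Set.ofList indices) (fun x => x) false := by
    intro x
    rw [PySem.List.mem_sorted]
  have hfc : (PySem.List.sorted (PySem.Set.ofList indices) (fun x => x) false).filter
        (fun v => decide ((v - 1) ∉ PySem.Set.ofList indices))
      = (PySem.List.sorted (PySem.Set.ofList indices) (fun x => x) false).filter
        (fun v => decide ((v - 1) ∉ PySem.List.sorted (PySem.Set.ofList indices) (fun x => x) false)) := by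
    apply List.filter_congr
    intro w _
    simp only [decide_eq_decide]
    rw [hmemiff]
  rw [hfc]
  have hlen : (PySem.Set.ofList indices).length
      = (PySem.List.sorted (PySem.Set.ofList indices) (fun x => x) false).length := by
    rw [PySem.List.length_sorted]
  have hwalk : (fun (st : Int) => renderRun (st, walkEnd (PySem.Set.ofList indices).length (PySem.Set.ofList indices) st))
      = (fun st => renderRun (st, walkEnd (PySem.List.sorted (PySem.Set.ofList indices) (fun x => x) false).length
          (PySem.List.sorted (PySem.Set.ofList indices) (fun x => x) false) st)) := by
    funext st
    rw [walkEnd_congr _ _ hmemiff, hlen]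
  rw [hwalk]
  have := runsB_eq (PySem.List.sorted (PySem.Set.ofList indices) (fun x => x) false)
    (PySem.List.sorted_ofList_pairwise_lt indices)
  rw [← this, List.map_map]
  rfl

theorem collapse_block_index_ranges_py_spec : Claim_equal_collapse_block_index_ranges_py := by
  intro indices _
  unfold Spec_collapse_block_index_ranges_py
  rw [altB_eq]
  unfold collapse_block_index_ranges_py
  by_cases hnil : indices = []
  · subst hnil; rfl
  · simp only [hnil, if_false]
    cases hs : PySem.List.sorted (PySem.Set.ofList indices) (fun x => x) false with
    | nil =>
      exfalso
      rw [PySem.List.sorted_eq_nil_iff] at hs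
      cases indices with
      | nil => exact hnil rfl
      | cons y ys =>
        have hy : y ∈ PySem.Set.ofList (y :: ys) := by
          rw [PySem.Set.mem_ofList]; exact List.mem_cons_self
        rw [hs] at hy
        exact (List.not_mem_nil) hy
    | cons x rest =>
      show PySem.Str.join ", " (loopA [] x x rest)
          = PySem.Str.join ", " (List.map renderRun (runsOf (x :: rest)))
      rw [loopA_eq, List.nil_append, ← addRun_eq_mergeRun]
      rfl
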